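-- pv_equiv track=rewrite | github.com/kiritgpillai/regulatory-compliance-assistant | app/sonar_module.py | _determine_citation_type
-- ===== SOURCE A (Python) =====
-- def _determine_citation_type(title: str, url: str) -> str:
--     # Determine the type of citation based on title and URL.
--     title_lower = title.lower()
--     url_lower = url.lower()
--
--     if any(keyword in title_lower for keyword in ['sec', 'securities', 'exchange']):
--         return "SEC"
--     elif any(keyword in title_lower for keyword in ['gdpr', 'general data protection']):
--         return "GDPR"
--     elif any(keyword in title_lower for keyword in ['sox', 'sarbanes', 'oxley']):
--         return "SOX"
--     elif any(domain in url_lower for domain in ['sec.gov', 'europa.eu']):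
--         if 'sec.gov' in url_lower:
--             return "SEC"
--         elif 'europa.eu' in url_lower:
--             return "GDPR"
--     elif any(keyword in title_lower for keyword in ['regulation', 'compliance', 'legal']):
--         return "Compliance"
--     else:
--         return "External Citation"
-- ===== SOURCE B (Python) =====
-- # B: instead of a short-circuiting if/elif chain, compute ALL six match groups
-- # eagerly into a 7-bit mask (bit 6 = default), then decode the lowest set bit.
-- _GROUPS = [
--     (['sec', 'securities', 'exchange'], 0),
--     (['gdpr', 'general data protection'], 0),
--     (['sox', 'sarbanes', 'oxley'], 0),
--     (['sec.gov'], 1),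
--     (['europa.eu'], 1),
--     (['regulation', 'compliance', 'legal'], 0),
-- ]
-- _LABELS = ["SEC", "GDPR", "SOX", "SEC", "GDPR", "Compliance", "External Citation"]
--
-- def _determine_citation_type(title: str, url: str) -> str:
--     texts = (title.lower(), url.lower())
--     mask = 1 << 6  # default bit always set
--     for i, (keywords, which) in enumerate(_GROUPS):
--         if any(k in texts[which] for k in keywords):
--             mask |= 1 << i
--     for i in range(7):
--         if (mask >> i) & 1:
--             return _LABELS[i]
-- ===== Notes on version B (the rewrite author's own statement) =====
-- stated objective: alternative
-- what changed: Instead of a short-circuiting if/elif chain, B eagerly evaluates all six keyword groups into a 7-bit match mask (with a default bit) in one loop and then decodes the answer as the label of the mask's lowest set bit.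
import Mathlib
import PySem

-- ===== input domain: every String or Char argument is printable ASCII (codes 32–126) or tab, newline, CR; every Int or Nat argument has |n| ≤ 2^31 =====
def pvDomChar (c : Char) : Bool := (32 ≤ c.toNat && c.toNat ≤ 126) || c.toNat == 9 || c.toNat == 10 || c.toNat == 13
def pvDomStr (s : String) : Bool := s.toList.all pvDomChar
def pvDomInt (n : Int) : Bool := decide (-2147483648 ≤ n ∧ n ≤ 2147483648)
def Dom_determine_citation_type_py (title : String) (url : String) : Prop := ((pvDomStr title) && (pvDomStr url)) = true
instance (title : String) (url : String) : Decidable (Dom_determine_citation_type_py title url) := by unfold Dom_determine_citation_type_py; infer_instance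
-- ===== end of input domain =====

-- B replaces A's short-circuiting if/elif chain by eagerly computing all six match
-- groups into a bitmask and decoding its lowest set bit (objective: alternative).

-- ===== PORT A =====
def determine_citation_type_py (title : String) (url : String) : String :=
  let title_lower := PySem.Str.lower title
  let url_lower := PySem.Str.lower url
  if (["sec", "securities", "exchange"].any fun k => PySem.Str.isIn k title_lower) then "SEC"
  else if (["gdpr", "general data protection"].any fun k => PySem.Str.isIn k title_lower) then "GDPR"
  else if (["sox", "sarbanes", "oxley"].any fun k => PySem.Str.isIn k title_lower) then "SOX"
  else if (["sec.gov", "europa.eu"].any fun d => PySem.Str.isIn d url_lower) then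
    (if PySem.Str.isIn "sec.gov" url_lower then "SEC"
     else if PySem.Str.isIn "europa.eu" url_lower then "GDPR"
     else "External Citation")  -- unreachable: the guarding `any` guarantees one inner branch fires
  else if (["regulation", "compliance", "legal"].any fun k => PySem.Str.isIn k title_lower) then "Compliance"
  else "External Citation"

-- ===== PORT B =====
-- match groups: (keywords, index of the field to search: 0 = title, 1 = url)
def pvGroups : List (List String × Nat) :=
  [(["sec", "securities", "exchange"], 0),
   (["gdpr", "general data protection"], 0),
   (["sox", "sarbanes", "oxley"], 0),
   (["sec.gov"], 1),
   (["europa.eu"], 1),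
   (["regulation", "compliance", "legal"], 0)]

def pvLabels : List String :=
  ["SEC", "GDPR", "SOX", "SEC", "GDPR", "Compliance", "External Citation"]

def determine_citation_type_py_alt (title : String) (url : String) : String :=
  let texts : String × String := (PySem.Str.lower title, PySem.Str.lower url)
  let mask : Nat := (PySem.List.enumerate pvGroups).foldl
    (fun m g =>
      if g.2.1.any (fun k => PySem.Str.isIn k (if g.2.2 == 0 then texts.1 else texts.2))
      then m ||| (1 <<< g.1.toNat) else m)
    (1 <<< 6)
  match (List.range 7).find? (fun i => (mask >>> i) &&& 1 == 1) with
  | some i => pvLabels.getD i ""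
  | none => ""  -- unreachable: bit 6 of mask is always set

-- ===== PRECONDITION & SPEC =====
def Spec_determine_citation_type_py (title : String) (url : String) (out : String) : Prop := out = determine_citation_type_py_alt title url
instance (title : String) (url : String) (out : String) : Decidable (Spec_determine_citation_type_py title url out) := by unfold Spec_determine_citation_type_py; infer_instance

-- ===== CLAIM (what is proved, stated in full; the proofs are below) =====
def Claim_equal_determine_citation_type_py : Prop := ∀ (title : String) (url : String), Dom_determine_citation_type_py title url → Spec_determine_citation_type_py title url (determine_citation_type_py title url)

-- ===== LEMMAS AND PROOFS =====

-- ===== VERDICT (by name: the statement is the Claim_ definition above) =====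
theorem determine_citation_type_py_spec : Claim_equal_determine_citation_type_py := by
  intro title url _
  unfold Spec_determine_citation_type_py determine_citation_type_py determine_citation_type_py_alt pvGroups
  simp only [PySem.List.enumerate, List.foldl, List.any_cons, List.any_nil, Bool.or_false,
    show ((0:Nat) == 0) = true from rfl, show ((1:Nat) == 0) = false from rfl, reduceIte, Bool.false_eq_true, if_false]
  generalize PySem.Str.isIn "sec" (PySem.Str.lower title) = a1
  generalize PySem.Str.isIn "securities" (PySem.Str.lower title) = a2
  generalize PySem.Str.isIn "exchange" (PySem.Str.lower title) = a3
  generalize PySem.Str.isIn "gdpr" (PySem.Str.lower title) = a4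
  generalize PySem.Str.isIn "general data protection" (PySem.Str.lower title) = a5
  generalize PySem.Str.isIn "sox" (PySem.Str.lower title) = a6
  generalize PySem.Str.isIn "sarbanes" (PySem.Str.lower title) = a7
  generalize PySem.Str.isIn "oxley" (PySem.Str.lower title) = a8
  generalize PySem.Str.isIn "sec.gov" (PySem.Str.lower url) = a9
  generalize PySem.Str.isIn "europa.eu" (PySem.Str.lower url) = a10
  generalize PySem.Str.isIn "regulation" (PySem.Str.lower title) = a11
  generalize PySem.Str.isIn "compliance" (PySem.Str.lower title) = a12
  generalize PySem.Str.isIn "legal" (PySem.Str.lower title) = a13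
  generalize (a1 || (a2 || a3) : Bool) = b1
  generalize (a4 || a5 : Bool) = b2
  generalize (a6 || (a7 || a8) : Bool) = b3
  generalize (a11 || (a12 || a13) : Bool) = b6
  revert b1 b2 b3 a9 a10 b6
  decide
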